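-- pv_equiv track=rewrite | github.com/tos-kamiya/stng | stng/text_funcs.py | includes_all_texts
-- ===== SOURCE A (Python) =====
-- from typing import List
--
-- def includes_all_texts(lines: List[str], texts: List[str]) -> bool:
--     remaining_text_set = set(texts)
--     for L in lines:
--         for text in list(remaining_text_set):
--             if L.find(text) >= 0:
--                 remaining_text_set.discard(text)
--                 if not remaining_text_set:
--                     return True
--     return False
-- ===== SOURCE B (Python) =====
-- def includes_all_texts(lines, texts):
--     return bool(texts) and all(any(text in line for line in lines) for text in texts)
-- ===== Notes on version B (the rewrite author's own statement) =====
-- stated objective: idiomatic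
-- what changed: Replaces the mutable remaining-set with early exit (outer loop over lines, inner over a per-line list(...) copy of the shrinking set) by a direct all/any quantifier nest over texts then lines, with an explicit empty-texts guard since an empty requirement set is reported as not satisfied.
import Mathlib
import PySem

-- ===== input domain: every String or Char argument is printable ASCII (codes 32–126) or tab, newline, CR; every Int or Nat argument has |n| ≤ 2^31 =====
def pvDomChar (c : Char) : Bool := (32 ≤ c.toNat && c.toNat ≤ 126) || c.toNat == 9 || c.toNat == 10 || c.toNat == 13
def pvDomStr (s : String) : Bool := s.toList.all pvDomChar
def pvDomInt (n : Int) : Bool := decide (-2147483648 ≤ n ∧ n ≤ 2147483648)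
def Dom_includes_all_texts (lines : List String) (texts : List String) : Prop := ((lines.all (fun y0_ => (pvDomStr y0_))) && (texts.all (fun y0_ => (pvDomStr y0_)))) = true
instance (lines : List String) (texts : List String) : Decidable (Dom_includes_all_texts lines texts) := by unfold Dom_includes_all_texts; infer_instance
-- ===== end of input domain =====

-- B replaces A's mutable remaining-set with early exit by a direct all/any quantifier nest
-- over texts then lines (idiomatic; empty texts explicitly reported as not satisfied, as in A).


-- ===== PORT A =====
-- inner loop: 'for text in list(remaining_text_set): …'; returns none where the Python
-- returns True early (set emptied), some of the remaining set otherwise.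
-- (The Python iterates a set snapshot in hash order; the result is order-independent —
-- proved by the equivalence below — so iterating in the Set's insertion order is exact.)
def pvInnerA (L : String) : List String → PySem.Set String → Option (PySem.Set String)
  | [], s => some s
  | text :: rest, s =>
    if 0 ≤ PySem.Str.find L text then
      let s' := PySem.Set.discard s text
      if s' = [] then none else pvInnerA L rest s'
    else pvInnerA L rest s

-- outer loop: 'for L in lines: …'
def pvOuterA : List String → PySem.Set String → Bool
  | [], _ => false
  | L :: rest, s =>
    match pvInnerA L s s with
    | none => true
    | some s' => pvOuterA rest s'

def includes_all_texts (lines : List String) (texts : List String) : Bool :=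
  pvOuterA lines (PySem.Set.ofList texts)

-- ===== PORT B =====
def includes_all_texts_alt (lines : List String) (texts : List String) : Bool :=
  !texts.isEmpty && texts.all (fun text => lines.any (fun line => PySem.Str.isIn text line))

-- ===== PRECONDITION & SPEC =====
def Spec_includes_all_texts (lines : List String) (texts : List String) (out : Bool) : Prop := out = includes_all_texts_alt lines texts
instance (lines : List String) (texts : List String) (out : Bool) : Decidable (Spec_includes_all_texts lines texts out) := by unfold Spec_includes_all_texts; infer_instance

-- ===== CLAIM (what is proved, stated in full; the proofs are below) =====
def Claim_equal_includes_all_texts : Prop := ∀ (lines : List String) (texts : List String), Dom_includes_all_texts lines texts → Spec_includes_all_texts lines texts (includes_all_texts lines texts)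

-- ===== LEMMAS AND PROOFS =====

theorem pvInnerA_none_iff (L : String) (ts : List String) :
    ∀ s : PySem.Set String, s.Nodup → s ≠ [] →
      (pvInnerA L ts s = none ↔ ∀ u ∈ s, u ∈ ts ∧ 0 ≤ PySem.Str.find L u) := by
  induction ts with
  | nil =>
    intro s _ hne
    simp only [pvInnerA]
    constructor
    · intro h; cases h
    · intro h
      obtain ⟨u, hu⟩ := List.exists_mem_of_ne_nil s hne
      exact absurd (h u hu).1 (List.not_mem_nil)
  | cons t rest ih =>
    intro s hnd hne
    simp only [pvInnerA]
    by_cases hf : 0 ≤ PySem.Str.find L t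
    · simp only [if_pos hf]
      by_cases he : PySem.Set.discard s t = []
      · simp only [if_pos he, true_iff]
        intro u hu
        by_cases hut : u = t
        · subst hut; exact ⟨List.mem_cons_self, hf⟩
        · exfalso
          have : u ∈ PySem.Set.discard s t := (PySem.Set.mem_discard s t u).2 ⟨hu, hut⟩
          rw [he] at this; exact List.not_mem_nil this
      · simp only [if_neg he]
        rw [ih (PySem.Set.discard s t) (PySem.Set.nodup_discard s t hnd) he]
        constructor
        · intro h u hu
          by_cases hut : u = t
          · subst hut; exact ⟨List.mem_cons_self, hf⟩
          · have := h u ((PySem.Set.mem_discard s t u).2 ⟨hu, hut⟩)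
            exact ⟨List.mem_cons_of_mem _ this.1, this.2⟩
        · intro h u hu
          have hu' := (PySem.Set.mem_discard s t u).1 hu
          have := h u hu'.1
          rcases List.mem_cons.1 this.1 with h1 | h1
          · exact absurd h1 hu'.2
          · exact ⟨h1, this.2⟩
    · simp only [if_neg hf]
      rw [ih s hnd hne]
      constructor
      · intro h u hu
        have := h u hu
        exact ⟨List.mem_cons_of_mem _ this.1, this.2⟩
      · intro h u hu
        have := h u hu
        rcases List.mem_cons.1 this.1 with h1 | h1
        · subst h1; exact absurd this.2 hf
        · exact ⟨h1, this.2⟩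

theorem pvInnerA_some (L : String) (ts : List String) :
    ∀ s : PySem.Set String, s.Nodup → s ≠ [] → ∀ r, pvInnerA L ts s = some r →
      r.Nodup ∧ r ≠ [] ∧ ∀ u, u ∈ r ↔ u ∈ s ∧ ¬(u ∈ ts ∧ 0 ≤ PySem.Str.find L u) := by
  induction ts with
  | nil =>
    intro s hnd hne r h
    simp only [pvInnerA, Option.some.injEq] at h
    subst h
    refine ⟨hnd, hne, fun u => ?_⟩
    simp
  | cons t rest ih =>
    intro s hnd hne r h
    simp only [pvInnerA] at h
    by_cases hf : 0 ≤ PySem.Str.find L t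
    · rw [if_pos hf] at h
      by_cases he : PySem.Set.discard s t = []
      · rw [if_pos he] at h; cases h
      · rw [if_neg he] at h
        obtain ⟨hr1, hr2, hr3⟩ := ih (PySem.Set.discard s t) (PySem.Set.nodup_discard s t hnd) he r h
        refine ⟨hr1, hr2, fun u => ?_⟩
        rw [hr3 u, PySem.Set.mem_discard]
        constructor
        · rintro ⟨⟨hus, hut⟩, hn⟩
          refine ⟨hus, fun hc => ?_⟩
          rcases List.mem_cons.1 hc.1 with h1 | h1
          · exact hut h1
          · exact hn ⟨h1, hc.2⟩
        · rintro ⟨hus, hn⟩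
          have hut : u ≠ t := fun hut => hn ⟨by rw [hut]; exact List.mem_cons_self, by rw [hut]; exact hf⟩
          exact ⟨⟨hus, hut⟩, fun hc => hn ⟨List.mem_cons_of_mem _ hc.1, hc.2⟩⟩
    · rw [if_neg hf] at h
      obtain ⟨hr1, hr2, hr3⟩ := ih s hnd hne r h
      refine ⟨hr1, hr2, fun u => ?_⟩
      rw [hr3 u]
      constructor
      · rintro ⟨hus, hn⟩
        refine ⟨hus, fun hc => ?_⟩
        rcases List.mem_cons.1 hc.1 with h1 | h1
        · subst h1; exact hf hc.2
        · exact hn ⟨h1, hc.2⟩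
      · rintro ⟨hus, hn⟩
        exact ⟨hus, fun hc => hn ⟨List.mem_cons_of_mem _ hc.1, hc.2⟩⟩

theorem pvOuterA_eq (ls : List String) :
    ∀ s : PySem.Set String, s.Nodup →
      pvOuterA ls s = (!s.isEmpty && s.all (fun t => ls.any (fun L => decide (0 ≤ PySem.Str.find L t)))) := by
  induction ls with
  | nil =>
    intro s _
    cases s with
    | nil => rfl
    | cons x xs => simp [pvOuterA]
  | cons L rest ih =>
    intro s hnd
    cases hse : s with
    | nil =>
      simp only [pvOuterA, pvInnerA]
      rw [ih [] List.nodup_nil]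
      rfl
    | cons x xs =>
      rw [← hse]
      have hne : s ≠ [] := by rw [hse]; exact List.cons_ne_nil _ _
      simp only [pvOuterA]
      cases h : pvInnerA L s s with
      | none =>
        have hall := (pvInnerA_none_iff L s s hnd hne).1 h
        rw [Bool.eq_iff_iff]
        simp only [Bool.and_eq_true, List.all_eq_true, List.any_eq_true, true_iff]
        constructor
        · simp [hne]
        · intro t ht
          exact ⟨L, List.mem_cons_self, by simpa using (hall t ht).2⟩
      | some r =>
        obtain ⟨hr1, hr2, hr3⟩ := pvInnerA_some L s s hnd hne r h
        show pvOuterA rest r = _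
        rw [ih r hr1]
        rw [Bool.eq_iff_iff]
        simp only [Bool.and_eq_true, List.all_eq_true, List.any_eq_true,
          Bool.not_eq_eq_eq_not, Bool.not_true, List.isEmpty_eq_false_iff]
        constructor
        · rintro ⟨-, hq⟩
          refine ⟨hne, fun t ht => ?_⟩
          by_cases hft : 0 ≤ PySem.Str.find L t
          · exact ⟨L, List.mem_cons_self, by simpa⟩
          · have htr : t ∈ r := (hr3 t).2 ⟨ht, fun hc => hft hc.2⟩
            obtain ⟨L', hL', hfL'⟩ := hq t htr
            exact ⟨L', List.mem_cons_of_mem _ hL', hfL'⟩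
        · rintro ⟨-, hq⟩
          refine ⟨hr2, fun t ht => ?_⟩
          obtain ⟨hts, htn⟩ := (hr3 t).1 ht
          obtain ⟨L', hL', hfL'⟩ := hq t hts
          rcases List.mem_cons.1 hL' with h1 | h1
          · subst h1; exact absurd ⟨hts, by simpa using hfL'⟩ htn
          · exact ⟨L', h1, hfL'⟩

theorem pvFound_iff (L t : String) :
    (0 ≤ PySem.Chars.find L.toList t.toList) ↔ PySem.Chars.isIn t.toList L.toList = true := by
  rw [show PySem.Chars.find L.toList t.toList = PySem.Str.find L t from rfl,
      show PySem.Chars.isIn t.toList L.toList = PySem.Str.isIn t L from rfl,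
      PySem.Str.find_nonneg_iff, PySem.Str.isIn_iff_infix]

-- ===== VERDICT (by name: the statement is the Claim_ definition above) =====
theorem includes_all_texts_spec : Claim_equal_includes_all_texts := by
  intro lines texts _
  unfold Spec_includes_all_texts includes_all_texts includes_all_texts_alt
  rw [pvOuterA_eq lines (PySem.Set.ofList texts) (PySem.Set.nodup_ofList texts)]
  rw [Bool.eq_iff_iff]
  simp only [Bool.and_eq_true, List.all_eq_true, Bool.not_eq_eq_eq_not, Bool.not_true,
    List.isEmpty_eq_false_iff]
  constructor
  · rintro ⟨h1, h2⟩
    refine ⟨fun hc => h1 (by rw [hc]; rfl), fun t ht => ?_⟩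
    have := h2 t ((PySem.Set.mem_ofList texts t).2 ht)
    simpa [pvFound_iff] using this
  · rintro ⟨h1, h2⟩
    refine ⟨fun hc => h1 ?_, fun t ht => ?_⟩
    · cases texts with
      | nil => rfl
      | cons x xs => rw [PySem.Set.ofList_cons] at hc; cases hc
    · have := h2 t ((PySem.Set.mem_ofList texts t).1 ht)
      simpa [pvFound_iff] using this
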